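-- pv_equiv track=rewrite | github.com/khannuuuuur/ECE176_U-net | PatchifyMBRSC.py | get_out_size
-- ===== SOURCE A (Python) =====
-- def get_out_size(in_size):
--     out_size = in_size
--     for _ in range(4):
--         out_size -= 4
--         if out_size < 1:
--             return -1
--         out_size = out_size//2
--         if out_size < 1:
--             return -1
--     for _ in range(4):
--         out_size = (out_size-4)*2
--     return out_size-4
-- ===== SOURCE B (Python) =====
-- def get_out_size(in_size):
--     # Closed form: the four encoder steps each map out -> (out-4)//2 and bail out
--     # (return -1) exactly when the current value is <= 5; composing the floor
--     # divisions gives (in_size-60)//16, valid iff in_size > 75.  The decoder's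
--     # four branch-free (out-4)*2 steps plus the final -4 are 16*out - 124.
--     return -1 if in_size <= 75 else 16 * ((in_size - 60) // 16) - 124
-- ===== Notes on version B (the rewrite author's own statement) =====
-- stated objective: simpler
-- what changed: Both loops are replaced by a single closed-form expression: the composed encoder floor divisions collapse to (in_size-60)//16 with the early -1 returns collapsing to the test in_size <= 75, and the decoder unrolls to 16*out-124.
import Mathlib
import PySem

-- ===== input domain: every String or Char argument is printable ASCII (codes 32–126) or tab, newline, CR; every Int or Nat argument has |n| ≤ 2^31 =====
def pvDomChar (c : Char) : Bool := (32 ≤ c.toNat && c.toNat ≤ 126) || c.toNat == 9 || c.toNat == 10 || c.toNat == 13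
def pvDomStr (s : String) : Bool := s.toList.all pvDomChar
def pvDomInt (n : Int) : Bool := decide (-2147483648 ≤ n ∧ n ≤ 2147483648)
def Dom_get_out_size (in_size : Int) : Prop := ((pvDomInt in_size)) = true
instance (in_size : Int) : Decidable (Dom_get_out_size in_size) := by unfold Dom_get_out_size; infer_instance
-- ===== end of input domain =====

-- B replaces A's two loops with a single closed-form expression (simpler).


-- ===== PORT A =====
-- first loop: four iterations, early exit (return -1) modelled as `none`
def pvEncLoop : Nat → Int → Option Int
  | 0, out => some out
  | n+1, out =>
      let out := out - 4
      if out < 1 then none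
      else
        let out := PySem.Int.floordiv out 2
        if out < 1 then none
        else pvEncLoop n out

-- second loop: four branch-free iterations
def pvDecLoop : Nat → Int → Int
  | 0, out => out
  | n+1, out => pvDecLoop n ((out - 4) * 2)

def get_out_size (in_size : Int) : Int :=
  match pvEncLoop 4 in_size with
  | none => -1
  | some out => pvDecLoop 4 out - 4

-- ===== PORT B =====
def get_out_size_alt (in_size : Int) : Int :=
  if in_size ≤ 75 then -1 else 16 * PySem.Int.floordiv (in_size - 60) 16 - 124

-- ===== PRECONDITION & SPEC =====
def Spec_get_out_size (in_size : Int) (out : Int) : Prop := out = get_out_size_alt in_size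
instance (in_size : Int) (out : Int) : Decidable (Spec_get_out_size in_size out) := by unfold Spec_get_out_size; infer_instance

-- ===== CLAIM (what is proved, stated in full; the proofs are below) =====
def Claim_equal_get_out_size : Prop := ∀ (in_size : Int), Dom_get_out_size in_size → Spec_get_out_size in_size (get_out_size in_size)

-- ===== LEMMAS AND PROOFS =====

-- ===== VERDICT (by name: the statement is the Claim_ definition above) =====
theorem get_out_size_spec : Claim_equal_get_out_size := by
  intro x _
  unfold Spec_get_out_size get_out_size get_out_size_alt
  simp only [pvEncLoop, pvDecLoop,
    PySem.Int.floordiv_eq_ediv_of_pos (a := x - 4) (by norm_num : (0:Int) < 2)]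
  simp only [PySem.Int.floordiv_eq_ediv_of_pos (by norm_num : (0:Int) < 2),
    PySem.Int.floordiv_eq_ediv_of_pos (by norm_num : (0:Int) < 16)]
  split_ifs <;> simp only [] <;> omega
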